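-- pv_equiv track=rewrite | github.com/peteryang1/PKU-software-implementation | 2019/2019_QASystem/code/writter/book.py | rid
-- ===== SOURCE A (Python) =====
-- def rid(raw, trash):
--     for pair in trash:
--         first = pair[0]
--         end = pair[1]
--         while 1:
--             head = raw.find(first)
--             if head == -1:
--                 break
--             tail = raw.find(end, head)
--             if tail == -1:
--                 break
--             if tail + 1 < len(raw):
--                 raw = raw[0: head] + raw[tail + 1:]
--             else:
--                 raw = raw[0: head]
--     return raw
-- ===== SOURCE B (Python) =====
-- def rid(raw, trash):
--     # Cursor scan instead of A's restart-from-0 find/splice loop: test a match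
--     # only at the cursor (startswith), jump the cursor to the next occurrence of
--     # the first delimiter character, and backtrack at most len(first)-1 places
--     # after a deletion (a new earliest match cannot appear further left).
--     for first, end in trash:
--         p = 0
--         while True:
--             if raw.startswith(first, p):
--                 t = raw.find(end, p)
--                 if t == -1:
--                     break
--                 raw = raw[:p] + raw[t + 1:]
--                 p = max(0, p - max(len(first) - 1, 0))
--             elif p < len(raw):
--                 q = raw.find(first[0], p + 1)
--                 if q == -1:
--                     break
--                 p = q
--             else:
--                 break
--     return raw
-- ===== Notes on version B (the rewrite author's own statement) =====
-- stated objective: alternative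
-- what changed: replaces A's restart-from-position-0 find(first)/splice loop by a cursor scan: test a match only at the cursor with startswith, jump the cursor to the next occurrence of the single character first[0], and backtrack at most len(first)-1 positions after a deletion; raw.find(first) is never called
import Mathlib
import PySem

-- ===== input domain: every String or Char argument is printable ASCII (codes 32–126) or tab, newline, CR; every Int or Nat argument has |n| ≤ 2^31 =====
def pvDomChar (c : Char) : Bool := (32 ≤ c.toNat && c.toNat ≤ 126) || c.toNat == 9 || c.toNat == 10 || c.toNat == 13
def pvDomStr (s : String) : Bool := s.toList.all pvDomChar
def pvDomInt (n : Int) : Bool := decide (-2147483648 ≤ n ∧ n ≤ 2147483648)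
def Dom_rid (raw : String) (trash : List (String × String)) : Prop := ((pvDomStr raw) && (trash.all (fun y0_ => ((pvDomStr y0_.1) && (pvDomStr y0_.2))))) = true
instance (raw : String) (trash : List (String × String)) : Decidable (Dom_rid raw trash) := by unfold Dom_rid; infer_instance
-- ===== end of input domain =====

-- B replaces A's restart-from-0 find/splice loop by a cursor scan with bounded backtracking; same return value, no speed claim.

-- ===== PORT A =====
-- A's inner 'while 1' loop for one (first, end) pair; fuel = len(raw)+1 suffices
-- under Pre_rid since every deletion removes at least one character.
def ridLoopA (first ende : List Char) : Nat → List Char → List Char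
  | 0, cs => cs
  | fuel + 1, cs =>
    let head := PySem.Chars.find cs first                 -- head = raw.find(first)
    if head = -1 then cs
    else
      let tail := PySem.Chars.findFrom cs ende head       -- tail = raw.find(end, head)
      if tail = -1 then cs
      else if tail + 1 < (cs.length : Int) then           -- raw = raw[0:head] + raw[tail+1:]
        ridLoopA first ende fuel
          (PySem.List.slice cs (some 0) (some head) ++ PySem.List.slice cs (some (tail + 1)) none)
      else                                                -- raw = raw[0:head]
        ridLoopA first ende fuel (PySem.List.slice cs (some 0) (some head))

def rid (raw : String) (trash : List (String × String)) : String :=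
  String.ofList (trash.foldl (fun cs pair => ridLoopA pair.1.toList pair.2.toList (cs.length + 1) cs) raw.toList)

-- ===== PORT B =====
-- B's inner loop: cursor p; 'raw.find(first[0], p+1)' is 'findFrom cs (first.take 1) (p+1)'
-- (first[0] as a 1-character string); 'raw.startswith(first, p)' is exact as
-- 'startswith (cs.drop p) first' on every reachable state (p ≤ len(raw) holds
-- throughout); Nat subtraction 'p - (first.length - 1)' is Python's
-- 'max(0, p - max(len(first) - 1, 0))'.  Fuel = (len+1)*(len+2) suffices under Pre_rid.
def ridLoopB (first ende : List Char) : Nat → List Char → Nat → List Char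
  | 0, cs, _ => cs
  | fuel + 1, cs, p =>
    if PySem.Chars.startswith (cs.drop p) first then      -- raw.startswith(first, p)
      let t := PySem.Chars.findFrom cs ende (p : Int)     -- t = raw.find(end, p)
      if t = -1 then cs
      else
        ridLoopB first ende fuel
          (PySem.List.slice cs (some 0) (some (p : Int)) ++ PySem.List.slice cs (some (t + 1)) none)
          (p - (first.length - 1))
    else if p < cs.length then
      -- q = raw.find(first[0], p + 1); first is nonempty whenever this runs
      let q := PySem.Chars.findFrom cs (first.take 1) (↑(p + 1))
      if q = -1 then cs
      else ridLoopB first ende fuel cs q.toNat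
    else cs

def rid_alt (raw : String) (trash : List (String × String)) : String :=
  String.ofList (trash.foldl (fun cs pair =>
    ridLoopB pair.1.toList pair.2.toList ((cs.length + 1) * (cs.length + 2)) cs 0) raw.toList)

-- ===== PRECONDITION & SPEC =====
-- Pre_rid excludes trash lists containing the pair ("", ""), on which A's while
-- loop never terminates (raw.find('') = 0 and the splice eventually loops on the
-- empty string forever), so A returns no value there; B diverges there as well.
def Pre_rid (raw : String) (trash : List (String × String)) : Prop :=
  ∀ pr ∈ trash, ¬(pr.1 = "" ∧ pr.2 = "")
instance (raw : String) (trash : List (String × String)) : Decidable (Pre_rid raw trash) := by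
  unfold Pre_rid; infer_instance

def pvWitness_rid : String × (List (String × String)) := ("a(b)c (d) e", [("(", ")"), ("x", "y")])

def Spec_rid (raw : String) (trash : List (String × String)) (out : String) : Prop := out = rid_alt raw trash
instance (raw : String) (trash : List (String × String)) (out : String) : Decidable (Spec_rid raw trash out) := by
  unfold Spec_rid; infer_instance

-- ===== CLAIM (what is proved, stated in full; the proofs are below) =====
def Claim_equal_rid : Prop := ∀ (raw : String) (trash : List (String × String)), Dom_rid raw trash → Pre_rid raw trash → Spec_rid raw trash (rid raw trash)

-- ===== LEMMAS AND PROOFS =====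

-- Invariant of B's cursor: no occurrence of `first` starts before position p.
def CleanBefore (first cs : List Char) (p : Nat) : Prop :=
  ∀ i < p, ¬ first <+: cs.drop i

-- With the invariant and a match at p, A's find lands exactly on the cursor.
lemma find_eq_cursor (f cs : List Char) (p : Nat) (hcl : CleanBefore f cs p) (hm : f <+: cs.drop p) :
    PySem.Chars.find cs f = (p : Int) := by
  have hin : f <:+: cs := by
    have : PySem.Chars.isIn f cs = true :=
      (PySem.Chars.exists_prefix_drop_iff_isIn f cs).mp ⟨p, hm⟩
    exact (PySem.Chars.isIn_iff_infix f cs).mp this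
  have hnn : 0 ≤ PySem.Chars.find cs f := (PySem.Chars.find_nonneg_iff cs f).mpr hin
  obtain ⟨hpre, hmin⟩ := PySem.Chars.find_spec hnn
  rcases lt_trichotomy (PySem.Chars.find cs f).toNat p with h | h | h
  · exact absurd hpre (hcl _ h)
  · omega
  · exact absurd hm (hmin p h)

lemma prefix_drop_of_prefix_eq_take {f cs cs' : List Char} {i k p : Nat}
    (hk : f.length = k) (hik : i + k ≤ p) (htk : cs'.take p = cs.take p) (h : f <+: cs'.drop i) : f <+: cs.drop i := by
  have hft : f = (cs'.drop i).take k := by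
    have := List.prefix_iff_eq_take.mp h
    rwa [hk] at this
  have hsw : (cs'.drop i).take k = (cs.drop i).take k := by
    have h1 : (cs'.take p).drop i = (cs.take p).drop i := by rw [htk]
    have h2 : ((cs'.take p).drop i).take k = ((cs.take p).drop i).take k := by rw [h1]
    have e1 : ((cs'.take p).drop i) = ((cs'.drop i).take (p - i)) := by
      rw [List.drop_take]
    have e2 : ((cs.take p).drop i) = ((cs.drop i).take (p - i)) := by
      rw [List.drop_take]
    rw [e1, e2] at h2
    have e3 : ((cs'.drop i).take (p - i)).take k = (cs'.drop i).take k := by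
      rw [List.take_take]; congr 1; omega
    have e4 : ((cs.drop i).take (p - i)).take k = (cs.drop i).take k := by
      rw [List.take_take]; congr 1; omega
    rw [e3, e4] at h2; exact h2
  rw [hft, hsw]
  exact List.take_prefix _ _

lemma slice0_eq (cs : List Char) (p : Nat) :
    PySem.List.slice cs (some 0) (some (p : Int)) = cs.take p := by
  simpa using PySem.List.slice_natCast cs 0 p

-- One splice step: both slice expressions are take p ++ drop (t+1).toNat.
lemma sliceA_eq (cs : List Char) (p : Nat) (t : Int) (ht : 0 ≤ t) :
    PySem.List.slice cs (some 0) (some (p : Int)) ++ PySem.List.slice cs (some (t + 1)) none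
      = cs.take p ++ cs.drop (t + 1).toNat := by
  rw [slice0_eq, PySem.List.slice_from cs (by omega : (0:Int) ≤ t + 1)]

-- A's loop returns its argument as soon as `first` does not occur at all.
lemma A_done (f e cs : List Char) (fa : Nat) (hno : ¬ f <:+: cs) :
    ridLoopA f e (fa + 1) cs = cs := by
  rw [ridLoopA]
  simp [(PySem.Chars.find_eq_neg_one_iff cs f).mpr hno]

lemma main_loop (f e : List Char) (hfe : ¬(f = [] ∧ e = [])) :
    ∀ (fuelB : Nat) (cs : List Char) (p fuelA : Nat),
      p ≤ cs.length → CleanBefore f cs p →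
      cs.length + 1 ≤ fuelA →
      (cs.length + 1) * (cs.length + 2) ≤ fuelB + p →
      ridLoopB f e fuelB cs p = ridLoopA f e fuelA cs := by
  intro fuelB
  induction fuelB with
  | zero =>
    intro cs p fuelA hp hcl hA hB
    exfalso; nlinarith
  | succ m ih =>
    intro cs p fuelA hp hcl hA hB
    obtain ⟨fa, rfl⟩ : ∃ fa, fuelA = fa + 1 := ⟨fuelA - 1, by omega⟩
    by_cases hs : PySem.Chars.startswith (cs.drop p) f = true
    · have hm : f <+: cs.drop p := (PySem.Chars.startswith_iff _ _).mp hs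
      have hfind : PySem.Chars.find cs f = (p : Int) := find_eq_cursor f cs p hcl hm
      rw [ridLoopB, ridLoopA, if_pos hs]
      simp only [hfind]
      rw [if_neg (by omega : ¬ ((p : Int) = -1))]
      set t := PySem.Chars.findFrom cs e (p : Int) with htdef
      by_cases ht : t = -1
      · simp only [if_pos ht]
      · simp only [if_neg ht]
        -- characterise t
        have hff := PySem.Chars.findFrom_natCast cs e p hp
        rw [← htdef] at hff
        have hqnn : 0 ≤ PySem.Chars.find (cs.drop p) e := by
          have := PySem.Chars.neg_one_le_find (cs.drop p) e
          by_cases hqq : PySem.Chars.find (cs.drop p) e = -1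
          · rw [hff, if_pos hqq] at ht; exact absurd rfl ht
          · omega
        have hq : t = (p : Int) + PySem.Chars.find (cs.drop p) e := by
          rw [hff, if_neg (by omega)]
        have hqle : PySem.Chars.find (cs.drop p) e ≤ ((cs.drop p).length : Int) :=
          PySem.Chars.find_le_length _ _
        have htnn : (p : Int) ≤ t := by omega
        have htlen : t ≤ (cs.length : Int) := by
          simp only [List.length_drop] at hqle; omega
        set cs' := cs.take p ++ cs.drop (t + 1).toNat with hcs'
        -- p < cs.length in this branch
        have hplt : p < cs.length := by
          rcases Nat.lt_or_ge p cs.length with h | h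
          · exact h
          · exfalso
            have hpe : p = cs.length := by omega
            have hdp : cs.drop p = [] := by rw [hpe, List.drop_length]
            have hfl : f = [] := by rw [hdp] at hm; simpa using hm
            have hel : e ≠ [] := fun hee => hfe ⟨hfl, hee⟩
            rw [hdp] at hqnn
            have : PySem.Chars.find ([] : List Char) e = -1 := by
              rw [PySem.Chars.find_eq_neg_one_iff]
              intro hinf
              exact hel (List.eq_nil_of_infix_nil hinf)
            omega
        have hlen'eq : cs'.length = p + (cs.length - min (t + 1).toNat cs.length) := by
          rw [hcs', List.length_append, List.length_take, List.length_drop]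
          omega
        have hlen' : cs'.length < cs.length := by omega
        -- invariant for the new state
        have htk : cs'.take p = cs.take p := by
          rw [hcs', List.take_append_of_le_length (by rw [List.length_take]; omega),
            List.take_take]
          congr 1
          omega
        have hcl' : CleanBefore f cs' (p - (f.length - 1)) := by
          intro i hi hpre
          have hk1 : 1 ≤ f.length := by
            by_contra hk
            have hf0 : f = [] := List.eq_nil_of_length_eq_zero (by omega)
            have hp0 : (p : Int) = 0 := by rw [← hfind, hf0]; exact PySem.Chars.find_nil cs
            omega
          have hik : i + f.length ≤ p := by omega
          have hcontra : f <+: cs.drop i :=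
            prefix_drop_of_prefix_eq_take rfl hik htk hpre
          have hnn : 0 ≤ PySem.Chars.find cs f := by rw [hfind]; omega
          obtain ⟨_, hmin⟩ := PySem.Chars.find_spec hnn
          exact hmin i (by rw [hfind]; omega) hcontra
        have hp' : p - (f.length - 1) ≤ cs'.length := by omega
        have hstep := ih cs' (p - (f.length - 1)) fa hp' hcl' (by omega) (by nlinarith)
        by_cases hbr : t + 1 < (cs.length : Int)
        · rw [if_pos hbr, sliceA_eq cs p t (by omega), ← hcs']
          exact hstep
        · rw [if_neg hbr, sliceA_eq cs p t (by omega), ← hcs']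
          have hdrop : cs.drop (t + 1).toNat = [] := List.drop_eq_nil_of_le (by omega)
          have hcseq : cs.take p = cs' := by rw [hcs', hdrop, List.append_nil]
          rw [slice0_eq, hcseq]
          exact hstep
    · have hfne : f ≠ [] := by
        intro h
        exact hs ((PySem.Chars.startswith_iff _ _).mpr (by simp [h]))
      have ht1ne : f.take 1 ≠ [] := by
        cases f with
        | nil => exact absurd rfl hfne
        | cons a l => simp
      by_cases hlt : p < cs.length
      · rw [ridLoopB]
        rw [if_neg (by simp [hs]), if_pos hlt]
        set q := PySem.Chars.findFrom cs (f.take 1) (↑(p + 1)) with hqdef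
        by_cases hq : q = -1
        · rw [if_pos hq]
          have hnotin : ¬ (f.take 1) <:+: cs.drop (p + 1) :=
            (PySem.Chars.findFrom_natCast_eq_neg_one_iff cs (f.take 1) (p + 1)
              (by omega)).mp (by rw [← hqdef]; exact hq)
          have hno : ¬ f <:+: cs := by
            intro hinf
            obtain ⟨j, hj⟩ := (PySem.Chars.exists_prefix_drop_iff_isIn f cs).mpr
              ((PySem.Chars.isIn_iff_infix f cs).mpr hinf)
            rcases Nat.lt_trichotomy j p with h | h | h
            · exact hcl j h hj
            · subst h; exact hs ((PySem.Chars.startswith_iff _ _).mpr hj)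
            · have h1 : f.take 1 <+: cs.drop j := (List.take_prefix 1 f).trans hj
              have h2 : cs.drop j = (cs.drop (p + 1)).drop (j - (p + 1)) := by
                rw [List.drop_drop]; congr 1; omega
              apply hnotin
              apply (PySem.Chars.isIn_iff_infix _ _).mp
              apply (PySem.Chars.exists_prefix_drop_iff_isIn _ _).mp
              exact ⟨j - (p + 1), by rw [← h2]; exact h1⟩
          exact (A_done f e cs fa hno).symm
        · rw [if_neg hq]
          obtain ⟨hq1, hq2, hq3⟩ := PySem.Chars.findFrom_natCast_spec cs (f.take 1) (p + 1)
            (by omega) (by rw [← hqdef]; exact hq)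
          have hqlen : q.toNat < cs.length := by
            by_contra hge
            have hnil : cs.drop q.toNat = [] := List.drop_eq_nil_of_le (by omega)
            rw [hnil] at hq2
            exact ht1ne (List.prefix_nil.mp hq2)
          have hcl' : CleanBefore f cs q.toNat := by
            intro i hi hj
            rcases Nat.lt_trichotomy i p with h | h | h
            · exact hcl i h hj
            · subst h; exact hs ((PySem.Chars.startswith_iff _ _).mpr hj)
            · exact hq3 i (by omega) hi ((List.take_prefix 1 f).trans hj)
          exact ih cs q.toNat (fa + 1) (by omega) hcl' hA (by omega)
      · -- p = cs.length and no match even at the end: A finds nothing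
        rw [ridLoopB]
        rw [if_neg (by simp [hs]), if_neg hlt]
        have hno : ¬ f <:+: cs := by
          intro hinf
          obtain ⟨j, hj⟩ := (PySem.Chars.exists_prefix_drop_iff_isIn f cs).mpr
            ((PySem.Chars.isIn_iff_infix f cs).mpr hinf)
          rcases Nat.lt_or_ge j p with h | h
          · exact hcl j h hj
          · have hje : cs.drop j = [] ∨ j = p := by
              rcases Nat.lt_or_ge j cs.length with h2 | h2
              · right; omega
              · left; exact List.drop_eq_nil_of_le h2
            rcases hje with h2 | h2
            · rw [h2] at hj
              exact hfne (by simpa using hj)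
            · subst h2
              exact hs ((PySem.Chars.startswith_iff _ _).mpr hj)
        exact (A_done f e cs fa hno).symm

-- per-pair equality at the ports' actual fuels
lemma per_pair (f e : List Char) (hfe : ¬(f = [] ∧ e = [])) (cs : List Char) :
    ridLoopB f e ((cs.length + 1) * (cs.length + 2)) cs 0 = ridLoopA f e (cs.length + 1) cs :=
  main_loop f e hfe _ cs 0 (cs.length + 1) (by omega) (fun i hi => absurd hi (by omega))
    (le_refl _) (by omega)

lemma fold_eq (trash : List (String × String)) :
    ∀ cs : List Char, (∀ pr ∈ trash, ¬(pr.1 = "" ∧ pr.2 = "")) →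
      trash.foldl (fun cs pair =>
          ridLoopB pair.1.toList pair.2.toList ((cs.length + 1) * (cs.length + 2)) cs 0) cs
        = trash.foldl (fun cs pair => ridLoopA pair.1.toList pair.2.toList (cs.length + 1) cs) cs := by
  induction trash with
  | nil => intro cs _; rfl
  | cons pr rest ihr =>
    intro cs hpre
    have hfe : ¬(pr.1.toList = [] ∧ pr.2.toList = []) := by
      intro ⟨h1, h2⟩
      exact hpre pr (List.mem_cons_self)
        ⟨String.toList_eq_nil_iff.mp h1, String.toList_eq_nil_iff.mp h2⟩
    simp only [List.foldl_cons]
    rw [per_pair pr.1.toList pr.2.toList hfe cs]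
    exact ihr _ (fun q hq => hpre q (List.mem_cons_of_mem _ hq))

-- ===== VERDICT (by name: the statement is the Claim_ definition above) =====
theorem rid_spec : Claim_equal_rid := by
  intro raw trash _hdom hpre
  unfold Spec_rid rid rid_alt
  rw [fold_eq trash raw.toList hpre]
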